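-- pv_equiv track=rewrite | github.com/kftlfd/leetcode | 2025/04/1168-2140-SolvingQuestionsWithBrainpower.py | mostPoints
-- ===== SOURCE A (Python) =====
-- from typing import List
--
-- def mostPoints(questions: List[List[int]]) -> int:
--     n = len(questions)
--     dp = [0] * n
--
--     for i in range(n - 1, -1, -1):
--         points, brainpower = questions[i]
--         nxt, nxt_solvable = i + 1, i + 1 + brainpower
--         skip = dp[nxt] if nxt < n else 0
--         solve = points + (dp[nxt_solvable] if nxt_solvable < n else 0)
--         dp[i] = max(skip, solve)
--
--     return dp[0]
-- ===== SOURCE B (Python) =====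
-- from typing import List
--
-- def mostPoints(questions: List[List[int]]) -> int:
--     # Forward push-DP: dp[j] = best score already banked whose cooldown releases at index j.
--     n = len(questions)
--     dp = [0] * (n + 1)
--     for i, (points, brainpower) in enumerate(questions):
--         cur = dp[i]
--         dp[i + 1] = max(dp[i + 1], cur)
--         target = min(i + 1 + brainpower, n)
--         dp[target] = max(dp[target], cur + points)
--     return dp[n]
-- ===== Notes on version B (the rewrite author's own statement) =====
-- stated objective: alternative
-- what changed: Replaces A's backward pull-tabulation (dp[i] computed from later cells, iterating i = n-1..0) by a forward push-DP over an (n+1)-cell table where each question relaxes dp[i+1] (skip) and dp[min(i+1+brainpower, n)] (solve) and the answer is dp[n].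
-- outside the precondition, e.g. on mostPoints([[5, -1]]): A returns 5, B returns 0
import Mathlib
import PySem

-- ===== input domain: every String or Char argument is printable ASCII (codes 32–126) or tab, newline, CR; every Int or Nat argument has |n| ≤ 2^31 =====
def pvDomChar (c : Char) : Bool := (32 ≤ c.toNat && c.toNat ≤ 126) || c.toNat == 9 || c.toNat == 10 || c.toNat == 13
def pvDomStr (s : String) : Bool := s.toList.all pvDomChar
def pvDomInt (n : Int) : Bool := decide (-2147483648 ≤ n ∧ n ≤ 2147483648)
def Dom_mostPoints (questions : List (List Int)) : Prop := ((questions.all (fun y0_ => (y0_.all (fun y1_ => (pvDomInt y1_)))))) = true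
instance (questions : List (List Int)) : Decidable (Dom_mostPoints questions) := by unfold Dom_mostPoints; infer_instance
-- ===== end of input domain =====

-- B replaces A's backward pull-tabulation by a forward push-DP over an (n+1)-cell table (same O(n) cost, different decomposition).


-- ===== PORT A =====
-- literal transliteration of A: dp of size n, loop i = n-1 .. 0, dp[i] = max(skip, solve), return dp[0]
def mostPoints (questions : List (List Int)) : Int :=
  let n : Int := questions.length
  let dp : List Int := List.replicate questions.length 0
  let dp := (PySem.List.pyRange (n - 1) (-1) (-1)).foldl (fun dp i =>
    let q := PySem.List.pyGetD questions i []        -- questions[i] (in range on Pre_)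
    let points := PySem.List.pyGetD q 0 0            -- unpack 'points, brainpower = questions[i]' (rows have length 2 on Pre_)
    let brainpower := PySem.List.pyGetD q 1 0
    let nxt := i + 1
    let nxtSolvable := i + 1 + brainpower
    let skip := if nxt < n then PySem.List.pyGetD dp nxt 0 else 0
    let solve := points + (if nxtSolvable < n then PySem.List.pyGetD dp nxtSolvable 0 else 0)
    PySem.List.pySetD dp i (max skip solve)) dp
  PySem.List.pyGetD dp 0 0                           -- dp[0] (IndexError on [], excluded by Pre_)

-- ===== PORT B =====
-- literal transliteration of B (Source B): dp of size n+1, forward enumerate loop pushing skip/solve, return dp[n]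
def mostPoints_alt (questions : List (List Int)) : Int :=
  let n : Int := questions.length
  let dp : List Int := List.replicate (questions.length + 1) 0
  let dp := (PySem.List.enumerate questions 0).foldl (fun dp iq =>
    let i := iq.1
    let q := iq.2
    let points := PySem.List.pyGetD q 0 0            -- unpack 'points, brainpower' (rows have length 2 on Pre_)
    let brainpower := PySem.List.pyGetD q 1 0
    let cur := PySem.List.pyGetD dp i 0
    let dp := PySem.List.pySetD dp (i + 1) (max (PySem.List.pyGetD dp (i + 1) 0) cur)
    let target := min (i + 1 + brainpower) n
    PySem.List.pySetD dp target (max (PySem.List.pyGetD dp target 0) (cur + points))) dp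
  PySem.List.pyGetD dp n 0

-- ===== PRECONDITION & SPEC =====
-- Pre_ excludes the empty list and rows whose length is not 2 (A raises IndexError/ValueError there), and rows with a
-- negative brainpower — outside the problem's natural domain — where A's returned value is an accident of reading
-- stale or negatively-wrapped dp cells.
def Pre_mostPoints (questions : List (List Int)) : Prop :=
  questions ≠ [] ∧ ∀ q ∈ questions, q.length = 2 ∧ 0 ≤ q.getD 1 0
instance (questions : List (List Int)) : Decidable (Pre_mostPoints questions) := by
  unfold Pre_mostPoints; infer_instance

def pvWitness_mostPoints : List (List Int) := [[3, 2], [4, 3], [4, 4], [2, 5]]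

def Spec_mostPoints (questions : List (List Int)) (out : Int) : Prop := out = mostPoints_alt questions
instance (questions : List (List Int)) (out : Int) : Decidable (Spec_mostPoints questions out) := by
  unfold Spec_mostPoints; infer_instance

-- ===== CLAIM (what is proved, stated in full; the proofs are below) =====
def Claim_equal_mostPoints : Prop := ∀ (questions : List (List Int)), Dom_mostPoints questions → Pre_mostPoints questions → Spec_mostPoints questions (mostPoints questions)

-- ===== LEMMAS AND PROOFS =====

-- the common recurrence: fDP qs i = best score obtainable from question i on
def fDP (qs : List (List Int)) (i : Nat) : Int :=
  if _h : i < qs.length then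
    let q := qs.getD i []
    let t := min (i + 1 + (q.getD 1 0).toNat) qs.length
    max (fDP qs (i + 1)) (q.getD 0 0 + fDP qs t)
  else 0
termination_by qs.length - i
decreasing_by all_goals omega

theorem fDP_of_ge (qs : List (List Int)) (i : Nat) (h : qs.length ≤ i) : fDP qs i = 0 := by
  rw [fDP]; simp [Nat.not_lt.mpr h]

theorem fDP_succ_le (qs : List (List Int)) (i : Nat) : fDP qs (i + 1) ≤ fDP qs i := by
  by_cases h : i < qs.length
  · conv_rhs => rw [fDP]
    simp only [h, dif_pos]
    exact le_max_left _ _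
  · rw [fDP_of_ge qs i (by omega), fDP_of_ge qs (i + 1) (by omega)]

-- getD after set, within bounds
theorem getD_set_ite (dp : List Int) (j k : Nat) (w : Int) (hj : j < dp.length) :
    (dp.set j w).getD k 0 = if k = j then w else dp.getD k 0 := by
  by_cases h : k = j
  · subst h; simp [List.getD_eq_getElem?_getD, hj]
  · simp [h, List.getD_eq_getElem?_getD, List.getElem?_set_ne (by omega : j ≠ k)]

theorem getD_replicate_zero (m k : Nat) : (List.replicate m (0:Int)).getD k 0 = 0 := by
  simp [List.getD_eq_getElem?_getD, List.getElem?_replicate]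
  split <;> rfl

-- phi qs dp i = max over j in [i, n] of dp[j] + fDP qs j (with dp[n] + 0 as base):
-- the final dp[n] of B's forward fold, seen from an intermediate state dp at index i
def phi (qs : List (List Int)) (dp : List Int) (i : Nat) : Int :=
  if i < qs.length then max (dp.getD i 0 + fDP qs i) (phi qs dp (i + 1)) else dp.getD qs.length 0
termination_by qs.length - i

theorem phi_of_lt (qs : List (List Int)) (dp : List Int) (i : Nat) (h : i < qs.length) :
    phi qs dp i = max (dp.getD i 0 + fDP qs i) (phi qs dp (i + 1)) := by
  rw [phi]; simp [h]

theorem phi_of_ge (qs : List (List Int)) (dp : List Int) (i : Nat) (h : qs.length ≤ i) :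
    phi qs dp i = dp.getD qs.length 0 := by
  rw [phi]; simp [Nat.not_lt.mpr h]

theorem phi_congr (qs : List (List Int)) (dp1 dp2 : List Int) (i : Nat) (hi : i ≤ qs.length)
    (h : ∀ k, i ≤ k → dp1.getD k 0 = dp2.getD k 0) : phi qs dp1 i = phi qs dp2 i := by
  by_cases hlt : i < qs.length
  · rw [phi_of_lt qs dp1 i hlt, phi_of_lt qs dp2 i hlt, h i le_rfl,
      phi_congr qs dp1 dp2 (i + 1) (by omega) (fun k hk => h k (by omega))]
  · rw [phi_of_ge qs dp1 i (by omega), phi_of_ge qs dp2 i (by omega)]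
    exact h qs.length (by omega)
termination_by qs.length - i

-- relaxing cell j (i ≤ j ≤ n) with candidate v raises phi by exactly the v + fDP qs j option
theorem phi_set_max (qs : List (List Int)) (dp : List Int) (i j : Nat) (v : Int)
    (hij : i ≤ j) (hj : j ≤ qs.length) (hlen : dp.length = qs.length + 1) :
    phi qs (dp.set j (max (dp.getD j 0) v)) i = max (phi qs dp i) (v + fDP qs j) := by
  by_cases hlt : i < qs.length
  · rw [phi_of_lt qs _ i hlt, phi_of_lt qs dp i hlt, getD_set_ite dp j i _ (by omega)]
    by_cases hji : i = j
    · rw [if_pos hji]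
      subst hji
      rw [phi_congr qs (dp.set i (max (dp.getD i 0) v)) dp (i + 1) (by omega)
        (fun k hk => by rw [getD_set_ite dp i k _ (by omega), if_neg (by omega)])]
      omega
    · rw [if_neg hji, phi_set_max qs dp (i + 1) j v (by omega) hj hlen]
      omega
  · have hi : i = qs.length := by omega
    have hjn : j = qs.length := by omega
    subst hi
    rw [phi_of_ge qs _ qs.length le_rfl, phi_of_ge qs dp qs.length le_rfl, hjn,
      getD_set_ite dp qs.length qs.length _ (by omega), if_pos rfl,
      fDP_of_ge qs qs.length le_rfl]
    omega
termination_by qs.length - i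

-- the all-zero table realises the recurrence itself
theorem phi_replicate (qs : List (List Int)) (i : Nat) :
    phi qs (List.replicate (qs.length + 1) 0) i = fDP qs i := by
  by_cases hlt : i < qs.length
  · rw [phi_of_lt qs _ i hlt, phi_replicate qs (i + 1), getD_replicate_zero]
    have := fDP_succ_le qs i
    omega
  · rw [phi_of_ge qs _ i (by omega), fDP_of_ge qs i (by omega), getD_replicate_zero]
termination_by qs.length - i

-- range(n-1, -1, -1) is the descending enumeration of [0, n)
theorem pyRange_desc (n : Nat) :
    PySem.List.pyRange ((n:Int) - 1) (-1) (-1)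
      = (List.range n).map (fun k : Nat => (n:Int) - 1 - (k:Int)) := by
  unfold PySem.List.pyRange
  norm_num
  cases n with
  | zero => norm_num
  | succ m =>
    rw [if_pos (by omega)]
    have h2 : ((m:Int) + 1 - 1 - -1 + 1 - 1) / 1 = (m : Int) + 1 := by omega
    norm_num [h2]
    intro a _
    ring

-- A's fold body, named for the proofs (identical to the lambda in mostPoints)
def stepA (qs : List (List Int)) (dp : List Int) (i : Int) : List Int :=
  let n : Int := qs.length
  let q := PySem.List.pyGetD qs i []
  let points := PySem.List.pyGetD q 0 0
  let brainpower := PySem.List.pyGetD q 1 0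
  let nxt := i + 1
  let nxtSolvable := i + 1 + brainpower
  let skip := if nxt < n then PySem.List.pyGetD dp nxt 0 else 0
  let solve := points + (if nxtSolvable < n then PySem.List.pyGetD dp nxtSolvable 0 else 0)
  PySem.List.pySetD dp i (max skip solve)

-- invariant of A's backward loop after m iterations: cells ≥ n - m hold the recurrence, the rest are still 0
def InvA (qs : List (List Int)) (m : Nat) (dp : List Int) : Prop :=
  dp.length = qs.length ∧
    ∀ j, j < qs.length → dp.getD j 0 = if qs.length - m ≤ j then fDP qs j else 0

theorem stepA_inv (qs : List (List Int)) (dp : List Int) (m : Nat)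
    (hm : m < qs.length) (hb : 0 ≤ (qs.getD (qs.length - 1 - m) []).getD 1 0)
    (hinv : InvA qs m dp) :
    InvA qs (m + 1) (stepA qs dp ((qs.length : Int) - 1 - (m : Int))) := by
  obtain ⟨hlen, hgd⟩ := hinv
  set iN : Nat := qs.length - 1 - m with hiN
  have hi : ((qs.length : Int) - 1 - (m : Int)) = ((iN : Nat) : Int) := by omega
  unfold stepA
  simp only [hi]
  rw [PySem.List.pyGetD_natCast qs]
  set q := qs.getD iN [] with hq
  have hp1 : PySem.List.pyGetD q 0 0 = q.getD 0 0 := by simp [pysem]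
  have hp2 : PySem.List.pyGetD q 1 0 = q.getD 1 0 := by simp [pysem]
  set b := q.getD 1 0 with hbdef
  have hc1 : ((iN : Int) + 1) = ((iN + 1 : Nat) : Int) := by push_cast; ring
  set sN : Nat := iN + 1 + b.toNat with hsN
  have hc2 : ((iN : Int) + 1 + PySem.List.pyGetD q 1 0) = ((sN : Nat) : Int) := by
    rw [hp2, hsN]; push_cast [Int.toNat_of_nonneg hb]; ring
  have hskip : (if ((iN : Int) + 1) < (qs.length : Int) then PySem.List.pyGetD dp ((iN : Int) + 1) 0 else 0)
      = fDP qs (iN + 1) := by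
    by_cases hlt : iN + 1 < qs.length
    · rw [if_pos (by exact_mod_cast hlt), hc1, PySem.List.pyGetD_natCast, hgd (iN + 1) hlt,
        if_pos (by omega)]
    · rw [if_neg (by exact_mod_cast hlt), fDP_of_ge qs (iN + 1) (by omega)]
  have hsolve : (if ((iN : Int) + 1 + PySem.List.pyGetD q 1 0) < (qs.length : Int)
        then PySem.List.pyGetD dp ((iN : Int) + 1 + PySem.List.pyGetD q 1 0) 0 else 0)
      = fDP qs (min sN qs.length) := by
    by_cases hlt : sN < qs.length
    · rw [if_pos (by rw [hc2]; exact_mod_cast hlt), hc2, PySem.List.pyGetD_natCast,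
        hgd sN hlt, if_pos (by omega), Nat.min_eq_left (by omega)]
    · rw [if_neg (by rw [hc2]; exact_mod_cast hlt), Nat.min_eq_right (by omega),
        fDP_of_ge qs qs.length le_rfl]
  rw [hp1, hskip, hsolve, PySem.List.pySetD_natCast]
  have hfd : fDP qs iN = max (fDP qs (iN + 1)) (q.getD 0 0 + fDP qs (min sN qs.length)) := by
    conv_lhs => rw [fDP]
    simp only [(by omega : iN < qs.length), dif_pos, ← hq, ← hbdef, ← hsN]
  constructor
  · rw [List.length_set, hlen]
  · intro j hj
    rw [getD_set_ite dp iN j _ (by omega)]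
    by_cases hji : j = iN
    · rw [if_pos hji, if_pos (by omega), hji, hfd]
    · rw [if_neg hji, hgd j hj]
      by_cases hcond : qs.length - m ≤ j
      · rw [if_pos hcond, if_pos (by omega)]
      · rw [if_neg hcond, if_neg (by omega)]

theorem foldA (qs : List (List Int)) (hpre : Pre_mostPoints qs) :
    ∀ m, m ≤ qs.length →
      InvA qs m (((List.range m).map (fun k : Nat => ((qs.length : Int)) - 1 - (k : Int))).foldl
        (stepA qs) (List.replicate qs.length 0)) := by
  intro m
  induction m with
  | zero =>
    intro _
    refine ⟨by simp, fun j hj => ?_⟩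
    rw [List.range_zero, List.map_nil, List.foldl_nil, getD_replicate_zero, if_neg (by omega)]
  | succ m ih =>
    intro hm
    rw [List.range_succ, List.map_append, List.foldl_append, List.map_singleton,
      List.foldl_cons, List.foldl_nil]
    have hmem : qs.getD (qs.length - 1 - m) [] ∈ qs := by
      rw [List.getD_eq_getElem?_getD, List.getElem?_eq_getElem (by omega)]
      exact List.getElem_mem _
    obtain ⟨-, hrow⟩ := hpre
    exact stepA_inv qs _ m (by omega) (hrow _ hmem).2 (ih (by omega))

-- A-side: mostPoints computes fDP qs 0
theorem mostPoints_eq_fDP (qs : List (List Int)) (hpre : Pre_mostPoints qs) :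
    mostPoints qs = fDP qs 0 := by
  have hrfl : mostPoints qs = PySem.List.pyGetD
      ((PySem.List.pyRange ((qs.length : Int) - 1) (-1) (-1)).foldl (stepA qs)
        (List.replicate qs.length 0)) 0 0 := rfl
  have hne : 0 < qs.length := by
    obtain ⟨hne, -⟩ := hpre
    exact List.length_pos_of_ne_nil hne
  obtain ⟨-, hgd⟩ := foldA qs hpre qs.length le_rfl
  rw [hrfl, pyRange_desc, PySem.List.pyGetD_zero, hgd 0 hne, if_pos (by omega)]

-- B's fold body, named for the proofs (identical to the lambda in mostPoints_alt)
def stepB (qs : List (List Int)) (dp : List Int) (iq : Int × List Int) : List Int :=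
  let n : Int := qs.length
  let i := iq.1
  let q := iq.2
  let points := PySem.List.pyGetD q 0 0
  let brainpower := PySem.List.pyGetD q 1 0
  let cur := PySem.List.pyGetD dp i 0
  let dp := PySem.List.pySetD dp (i + 1) (max (PySem.List.pyGetD dp (i + 1) 0) cur)
  let target := min (i + 1 + brainpower) n
  PySem.List.pySetD dp target (max (PySem.List.pyGetD dp target 0) (cur + points))

theorem stepB_phi (qs : List (List Int)) (dp : List Int) (i : Nat)
    (hlen : dp.length = qs.length + 1) (hi : i < qs.length)
    (hb : 0 ≤ (qs.getD i []).getD 1 0) :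
    phi qs (stepB qs dp ((i : Int), qs.getD i [])) (i + 1) = phi qs dp i := by
  unfold stepB
  simp only
  set q := qs.getD i [] with hq
  have hp1 : PySem.List.pyGetD q 0 0 = q.getD 0 0 := by simp [pysem]
  have hp2 : PySem.List.pyGetD q 1 0 = q.getD 1 0 := by simp [pysem]
  have hcur : PySem.List.pyGetD dp (i : Int) 0 = dp.getD i 0 := by
    rw [PySem.List.pyGetD_natCast]
  have hc1 : ((i : Int) + 1) = ((i + 1 : Nat) : Int) := by push_cast; ring
  set b := q.getD 1 0 with hbdef
  set tN : Nat := min (i + 1 + b.toNat) qs.length with htN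
  have htgt : min ((i : Int) + 1 + PySem.List.pyGetD q 1 0) (qs.length : Int) = ((tN : Nat) : Int) := by
    rw [hp2, htN]
    push_cast [Int.toNat_of_nonneg hb]
    omega
  rw [hp1, hcur, htgt, hc1, PySem.List.pySetD_natCast, PySem.List.pyGetD_natCast,
    PySem.List.pySetD_natCast, PySem.List.pyGetD_natCast]
  set dp' := dp.set (i + 1) (max (dp.getD (i + 1) 0) (dp.getD i 0)) with hdp'
  have hdp'len : dp'.length = qs.length + 1 := by rw [hdp', List.length_set, hlen]
  have hgd : dp'.getD tN 0 = max (dp'.getD tN 0) (dp'.getD tN 0) := (max_self _).symm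
  rw [phi_set_max qs dp' (i + 1) tN (dp.getD i 0 + q.getD 0 0) (by omega) (by omega) hdp'len,
    hdp', phi_set_max qs dp (i + 1) (i + 1) (dp.getD i 0) le_rfl (by omega) hlen,
    phi_of_lt qs dp i hi]
  conv_rhs => rw [fDP]
  simp only [hi, dif_pos, ← hq, ← hbdef, ← htN]
  omega

theorem foldB (qs : List (List Int)) (hpre : Pre_mostPoints qs) :
    ∀ (l : List (List Int)) (i : Nat) (dp : List Int), dp.length = qs.length + 1 →
      qs.drop i = l →
      ((PySem.List.enumerate l (i : Int)).foldl (stepB qs) dp).getD qs.length 0 = phi qs dp i := by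
  intro l
  induction l with
  | nil =>
    intro i dp hlen hdrop
    have hni : qs.length ≤ i := by
      by_contra hc
      exact absurd hdrop (by simp [Nat.lt_of_not_le hc, List.drop_eq_nil_iff])
    rw [PySem.List.enumerate_nil, List.foldl_nil, phi_of_ge qs dp i hni]
  | cons q l' ih =>
    intro i dp hlen hdrop
    have hi : i < qs.length := by
      by_contra hc
      rw [List.drop_eq_nil_of_le (by omega)] at hdrop
      exact List.cons_ne_nil q l' hdrop.symm
    have hq : qs[i]? = some q := by
      have h0 : (qs.drop i)[0]? = qs[i + 0]? := List.getElem?_drop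
      rw [hdrop] at h0
      simpa using h0.symm
    have hqD : qs.getD i [] = q := by rw [List.getD_eq_getElem?_getD, hq]; rfl
    have hdrop' : qs.drop (i + 1) = l' := by
      have := congrArg List.tail hdrop
      simpa [List.tail_drop] using this
    have hmem : q ∈ qs := List.mem_of_getElem? hq
    obtain ⟨-, hrow⟩ := hpre
    obtain ⟨-, hb⟩ := hrow q hmem
    rw [PySem.List.enumerate_cons, List.foldl_cons]
    have hc1 : ((i : Int) + 1) = ((i + 1 : Nat) : Int) := by push_cast; ring
    rw [hc1, ih (i + 1) (stepB qs dp ((i : Int), q))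
      (by unfold stepB; simp only [PySem.List.length_pySetD, hlen]) hdrop']
    rw [← hqD] at hb ⊢
    exact stepB_phi qs dp i hlen hi hb

-- B-side: mostPoints_alt computes fDP qs 0
theorem mostPoints_alt_eq_fDP (qs : List (List Int)) (hpre : Pre_mostPoints qs) :
    mostPoints_alt qs = fDP qs 0 := by
  have hrfl : mostPoints_alt qs = PySem.List.pyGetD
      ((PySem.List.enumerate qs 0).foldl (stepB qs)
        (List.replicate (qs.length + 1) 0)) (qs.length : Int) 0 := rfl
  rw [hrfl, PySem.List.pyGetD_natCast]
  exact (foldB qs hpre qs 0 (List.replicate (qs.length + 1) 0) (by simp) (by simp)).trans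
    (phi_replicate qs 0)

-- ===== VERDICT (by name: the statement is the Claim_ definition above) =====
theorem mostPoints_spec : Claim_equal_mostPoints := by
  intro qs _ hpre
  unfold Spec_mostPoints
  rw [mostPoints_eq_fDP qs hpre, mostPoints_alt_eq_fDP qs hpre]
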